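-- pv_equiv track=rewrite | github.com/PeisongZhang/symbolic_tensor_graph | symbolic_tensor_graph/graph/pipeline_schedule.py | _build_1f1b_sequence
-- ===== SOURCE A (Python) =====
-- PHASE_F = "F"
--
-- PHASE_B = "B"
--
-- def _build_1f1b_sequence(num_mb, p, rank):
--     """Build the 1F1B action sequence for a given rank.
--
--     Returns a list of (phase, mb_idx) tuples, in execution order.
--
--     rank is 0..p-1 where rank 0 = first stage.
--     Warmup = p - rank forwards (stage 0 does all m F first if p-rank >= m).
--     Cooldown = p - rank backwards.
--     Steady: interleaved 1F 1B.
--     """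
--     warmup = min(p - rank, num_mb)
--     steady = max(0, num_mb - warmup)
--
--     seq = []
--     # Warmup: F of mb 0..warmup-1
--     for i in range(warmup):
--         seq.append((PHASE_F, i))
--     # Steady: alternating 1F 1B.
--     # After warmup, the first-backward mb is 0 and first-forward is `warmup`.
--     for i in range(steady):
--         mb_f = warmup + i
--         mb_b = i
--         seq.append((PHASE_B, mb_b))
--         seq.append((PHASE_F, mb_f))
--     # Cool-down: remaining backward passes.
--     # Backward side has run `steady` already (indices 0..steady-1); still need
--     # num_mb - steady backwards, indexed [steady, num_mb).
--     for i in range(steady, num_mb):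
--         seq.append((PHASE_B, i))
--     return seq
-- ===== SOURCE B (Python) =====
-- PHASE_F = "F"
--
-- PHASE_B = "B"
--
-- def _build_1f1b_sequence(num_mb, p, rank):
--     """Closed form: read the 1F1B action off by time step t instead of
--     building the schedule up phase by phase."""
--     lead = min(p - rank, num_mb)      # how far forwards run ahead of backwards
--     steady = num_mb - lead            # number of interleaved 1F1B pairs
--     warm = max(0, lead)               # warmup forwards = cooldown backwards
--
--     def action(t):
--         if t < warm:                                  # warmup forward
--             return (PHASE_F, t)
--         u = t - warm
--         if u < 2 * steady:                            # steady pair, B first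
--             return (PHASE_B, u // 2) if u % 2 == 0 else (PHASE_F, lead + u // 2)
--         return (PHASE_B, steady + (u - 2 * steady))   # cooldown backward
--
--     return [action(t) for t in range(warm + 2 * steady + warm)]
-- ===== Notes on version B (the rewrite author's own statement) =====
-- stated objective: alternative
-- what changed: Replaces A's three appending loops (warmup/steady/cooldown) with a closed-form position-to-action formula: the schedule is read off as [action(t) for t in range(total)], where action(t) decides phase and microbatch index arithmetically from t.
import Mathlib
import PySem

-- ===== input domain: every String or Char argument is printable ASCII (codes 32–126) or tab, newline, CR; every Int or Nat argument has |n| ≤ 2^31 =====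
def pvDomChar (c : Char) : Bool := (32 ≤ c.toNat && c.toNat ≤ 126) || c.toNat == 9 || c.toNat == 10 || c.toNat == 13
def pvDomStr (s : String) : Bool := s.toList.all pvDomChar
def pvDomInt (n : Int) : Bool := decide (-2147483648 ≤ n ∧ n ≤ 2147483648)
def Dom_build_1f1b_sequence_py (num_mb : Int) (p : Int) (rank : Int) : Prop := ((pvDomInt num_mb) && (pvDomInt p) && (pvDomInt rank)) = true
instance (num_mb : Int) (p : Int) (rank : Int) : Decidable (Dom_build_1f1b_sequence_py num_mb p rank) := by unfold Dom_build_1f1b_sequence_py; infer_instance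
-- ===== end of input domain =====

-- B replaces A's three appending loops with a closed-form position→action formula
-- (objective: alternative decomposition, same cost).

-- ===== PORT A =====
def build_1f1b_sequence_py (num_mb : Int) (p : Int) (rank : Int) : List (String × Int) :=
  let warmup := min (p - rank) num_mb
  let steady := max 0 (num_mb - warmup)
  let seq : List (String × Int) := []
  let seq := (PySem.List.pyRange 0 warmup 1).foldl (fun s i => s ++ [("F", i)]) seq
  let seq := (PySem.List.pyRange 0 steady 1).foldl
               (fun s i => s ++ [("B", i), ("F", warmup + i)]) seq
  let seq := (PySem.List.pyRange steady num_mb 1).foldl (fun s i => s ++ [("B", i)]) seq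
  seq

-- ===== PORT B =====
-- Source B's inner `action(t)`: phase and microbatch index at time step t
def pvAct (lead steady warm : Int) (t : Int) : String × Int :=
  if t < warm then ("F", t)
  else
    let u := t - warm
    if u < 2 * steady then
      if PySem.Int.mod u 2 == 0 then ("B", PySem.Int.floordiv u 2)
      else ("F", lead + PySem.Int.floordiv u 2)
    else ("B", steady + (u - 2 * steady))

def build_1f1b_sequence_py_alt (num_mb : Int) (p : Int) (rank : Int) : List (String × Int) :=
  let lead := min (p - rank) num_mb
  let steady := num_mb - lead
  let warm := max 0 lead
  (PySem.List.pyRange 0 (warm + 2 * steady + warm) 1).map (pvAct lead steady warm)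

-- ===== PRECONDITION & SPEC =====
def Spec_build_1f1b_sequence_py (num_mb : Int) (p : Int) (rank : Int) (out : List (String × Int)) : Prop := out = build_1f1b_sequence_py_alt num_mb p rank
instance (num_mb : Int) (p : Int) (rank : Int) (out : List (String × Int)) : Decidable (Spec_build_1f1b_sequence_py num_mb p rank out) := by unfold Spec_build_1f1b_sequence_py; infer_instance

-- ===== CLAIM (what is proved, stated in full; the proofs are below) =====
def Claim_equal_build_1f1b_sequence_py : Prop := ∀ (num_mb : Int) (p : Int) (rank : Int), Dom_build_1f1b_sequence_py num_mb p rank → Spec_build_1f1b_sequence_py num_mb p rank (build_1f1b_sequence_py num_mb p rank)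

-- ===== LEMMAS AND PROOFS =====

-- canonical block shapes both programs produce
def pvFs (start : Int) : Nat → List (String × Int)
  | 0 => []
  | n+1 => ("F", start) :: pvFs (start+1) n

def pvBs (start : Int) : Nat → List (String × Int)
  | 0 => []
  | n+1 => ("B", start) :: pvBs (start+1) n

def pvPairs (bstart fstart : Int) : Nat → List (String × Int)
  | 0 => []
  | n+1 => ("B", bstart) :: ("F", fstart) :: pvPairs (bstart+1) (fstart+1) n

-- A-side: the three ranges map to the canonical blocks
theorem pv_map_F (n : Nat) : ∀ a b : Int, b - a = n →
    (PySem.List.pyRange a b 1).map (fun i => (("F" : String), i)) = pvFs a n := by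
  induction n with
  | zero =>
    intro a b h
    rw [PySem.List.pyRange_one_eq_nil (by omega)]; rfl
  | succ n ih =>
    intro a b h
    rw [PySem.List.pyRange_one_cons (by omega)]
    simp only [List.map_cons, pvFs]
    rw [ih (a+1) b (by omega)]

theorem pv_map_B (n : Nat) : ∀ a b : Int, b - a = n →
    (PySem.List.pyRange a b 1).map (fun i => (("B" : String), i)) = pvBs a n := by
  induction n with
  | zero =>
    intro a b h
    rw [PySem.List.pyRange_one_eq_nil (by omega)]; rfl
  | succ n ih =>
    intro a b h
    rw [PySem.List.pyRange_one_cons (by omega)]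
    simp only [List.map_cons, pvBs]
    rw [ih (a+1) b (by omega)]

theorem pv_flatMap_pairs (w : Int) (n : Nat) : ∀ a b : Int, b - a = n →
    (PySem.List.pyRange a b 1).flatMap (fun i => [(("B" : String), i), (("F" : String), w + i)])
      = pvPairs a (w + a) n := by
  induction n with
  | zero =>
    intro a b h
    rw [PySem.List.pyRange_one_eq_nil (by omega)]; rfl
  | succ n ih =>
    intro a b h
    rw [PySem.List.pyRange_one_cons (by omega)]
    simp only [List.flatMap_cons, pvPairs, List.cons_append, List.nil_append]
    rw [ih (a+1) b (by omega)]
    ring_nf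

-- B-side: the three position segments of the formula give the same blocks
theorem pv_alt_warm (lead steady warm : Int) (n : Nat) : ∀ a : Int, a + n = warm →
    (PySem.List.pyRange a warm 1).map (pvAct lead steady warm) = pvFs a n := by
  induction n with
  | zero =>
    intro a h
    rw [PySem.List.pyRange_one_eq_nil (by omega)]; rfl
  | succ n ih =>
    intro a h
    rw [PySem.List.pyRange_one_cons (by omega)]
    simp only [List.map_cons, pvFs]
    rw [ih (a+1) (by push_cast at h ⊢; omega)]
    have : pvAct lead steady warm a = ("F", a) := by
      unfold pvAct; rw [if_pos (by omega)]
    rw [this]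

theorem pv_alt_steady (lead steady warm : Int) (n : Nat) :
    ∀ i : Int, 0 ≤ i → i + n = steady →
    (PySem.List.pyRange (warm + 2*i) (warm + 2*steady) 1).map (pvAct lead steady warm)
      = pvPairs i (lead + i) n := by
  induction n with
  | zero =>
    intro i _ h
    rw [PySem.List.pyRange_one_eq_nil (by omega)]; rfl
  | succ n ih =>
    intro i hi h
    have hlt : i < steady := by push_cast at h; omega
    rw [PySem.List.pyRange_one_cons (by omega)]
    rw [show warm + 2*i + 1 = warm + (2*i + 1) by ring,
        PySem.List.pyRange_one_cons (by omega)]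
    simp only [List.map_cons, pvPairs]
    have e1 : pvAct lead steady warm (warm + 2*i) = ("B", i) := by
      unfold pvAct
      rw [if_neg (by omega)]
      simp only
      rw [show warm + 2*i - warm = 2*i by ring]
      rw [if_pos (by omega)]
      rw [PySem.Int.mod_eq_emod_of_pos (by omega),
          PySem.Int.floordiv_eq_ediv_of_pos (by omega)]
      have h1 : (2*i) % 2 = 0 := by omega
      have h2 : (2*i) / 2 = i := by omega
      rw [h1, h2]; rfl
    have e2 : pvAct lead steady warm (warm + (2*i + 1)) = ("F", lead + i) := by
      unfold pvAct
      rw [if_neg (by omega)]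
      simp only
      rw [show warm + (2*i + 1) - warm = 2*i + 1 by ring]
      rw [if_pos (by omega)]
      rw [PySem.Int.mod_eq_emod_of_pos (by omega),
          PySem.Int.floordiv_eq_ediv_of_pos (by omega)]
      have h1 : (2*i + 1) % 2 = 1 := by omega
      have h2 : (2*i + 1) / 2 = i := by omega
      rw [h1, h2]
      rfl
    rw [e1, e2]
    rw [show warm + (2*i + 1) + 1 = warm + 2*(i+1) by ring]
    rw [ih (i+1) (by omega) (by push_cast at h ⊢; omega)]
    ring_nf

theorem pv_alt_cool (lead steady warm : Int) (hs : 0 ≤ steady) (n : Nat) :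
    ∀ a : Int, warm + 2*steady ≤ a → a + n = warm + 2*steady + warm →
    (PySem.List.pyRange a (warm + 2*steady + warm) 1).map (pvAct lead steady warm)
      = pvBs (steady + (a - warm - 2*steady)) n := by
  induction n with
  | zero =>
    intro a _ h
    rw [PySem.List.pyRange_one_eq_nil (by omega)]; rfl
  | succ n ih =>
    intro a ha h
    rw [PySem.List.pyRange_one_cons (by omega)]
    simp only [List.map_cons, pvBs]
    have e : pvAct lead steady warm a = ("B", steady + (a - warm - 2*steady)) := by
      unfold pvAct
      rw [if_neg (by omega)]
      simp only
      rw [if_neg (by omega)]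
    rw [e, ih (a+1) (by omega) (by push_cast at h ⊢; omega)]
    have : steady + (a + 1 - warm - 2*steady) = steady + (a - warm - 2*steady) + 1 := by ring
    rw [this]

-- ===== VERDICT (by name: the statement is the Claim_ definition above) =====
theorem build_1f1b_sequence_py_spec : Claim_equal_build_1f1b_sequence_py := by
  intro num_mb p rank _
  unfold Spec_build_1f1b_sequence_py build_1f1b_sequence_py build_1f1b_sequence_py_alt
  simp only [PySem.List.foldl_append_singleton_eq_map, PySem.List.foldl_append_eq_flatMap,
    List.nil_append]
  set w := min (p - rank) num_mb with hw
  have hwle : w ≤ num_mb := min_le_right _ _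
  have hsteady : max 0 (num_mb - w) = num_mb - w := by omega
  rw [hsteady]
  set s := num_mb - w with hs
  have hs0 : 0 ≤ s := by omega
  by_cases hneg : w ≤ 0
  · -- lead ≤ 0: no warmup and no cooldown; everything is steady pairs
    have hwarm : max 0 w = 0 := by omega
    rw [hwarm]
    rw [PySem.List.pyRange_one_eq_nil hneg,
        PySem.List.pyRange_one_eq_nil (by omega : num_mb ≤ s),
        pv_flatMap_pairs w s.toNat 0 s (by omega)]
    rw [show (0 : Int) + 2*s + 0 = 0 + 2*s by ring]
    rw [show (PySem.List.pyRange 0 (0 + 2*s) 1) = PySem.List.pyRange (0 + 2*0) (0 + 2*s) 1 by norm_num]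
    rw [pv_alt_steady w s 0 s.toNat 0 le_rfl (by omega)]
    simp
  · -- lead > 0: warmup forwards, steady pairs, cooldown backwards
    have hpos : 0 < w := by omega
    have hwarm : max 0 w = w := by omega
    rw [hwarm]
    rw [pv_map_F w.toNat 0 w (by omega),
        pv_flatMap_pairs w s.toNat 0 s (by omega),
        pv_map_B (num_mb - s).toNat s num_mb (by omega)]
    rw [PySem.List.pyRange_one_append 0 w (w + 2*s + w) (by omega) (by omega),
        PySem.List.pyRange_one_append w (w + 2*s) (w + 2*s + w) (by omega) (by omega),
        List.map_append, List.map_append]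
    rw [pv_alt_warm w s w w.toNat 0 (by omega)]
    rw [show (PySem.List.pyRange w (w + 2*s) 1) = PySem.List.pyRange (w + 2*0) (w + 2*s) 1 by norm_num]
    rw [pv_alt_steady w s w s.toNat 0 le_rfl (by omega)]
    rw [pv_alt_cool w s w hs0 w.toNat (w + 2*s) (by omega) (by omega)]
    have e1 : s + (w + 2*s - w - 2*s) = s := by ring
    have e2 : (num_mb - s).toNat = w.toNat := by omega
    have e3 : w + (0:Int) = w := by ring
    rw [e1, e2, e3, List.append_assoc]
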